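-- pv_equiv track=rewrite | github.com/anisha1095/ResponsibleRelationExtraction | Codebase/py_relex/ConstNetwork.py | extract_const_triple
-- ===== SOURCE A (Python) =====
-- def extract_const_triple(token_list, e1_id, e2_id): # e1 need to be before e2
--     e1, const, e2 = [], [], []
--     for token in token_list:
--         if token[8] == e1_id:
--             e1.append(token)
--         if token[8] == e2_id:
--             e2.append(token)
--         if e1!=[] and e2==[]:
--             const.append(token)
--         if e1==[] and e2!=[]:
--             const.append(token)
--     return[e1, e2, const]
-- ===== SOURCE B (Python) =====
-- def extract_const_triple(token_list, e1_id, e2_id): # e1 need to be before e2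
--     e1, e2 = [], []
--     i1 = None
--     i2 = None
--     for k, token in enumerate(token_list):
--         tid = token[8]
--         if tid == e1_id:
--             e1.append(token)
--             if i1 is None:
--                 i1 = k
--         if tid == e2_id:
--             e2.append(token)
--             if i2 is None:
--                 i2 = k
--     if i1 is None and i2 is None:
--         const = []
--     elif i1 is None:
--         const = list(token_list[i2:])
--     elif i2 is None:
--         const = list(token_list[i1:])
--     else:
--         const = list(token_list[min(i1, i2):max(i1, i2)])
--     return [e1, e2, const]
-- ===== Notes on version B (the rewrite author's own statement) =====
-- stated objective: alternative
-- what changed: A decides membership of each token in `const` by tracking the cumulative emptiness of e1/e2 while it folds; B instead records the first occurrence index of each entity id in one pass and produces `const` as a single slice of token_list between (or after) those boundary indices.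
import Mathlib
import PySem

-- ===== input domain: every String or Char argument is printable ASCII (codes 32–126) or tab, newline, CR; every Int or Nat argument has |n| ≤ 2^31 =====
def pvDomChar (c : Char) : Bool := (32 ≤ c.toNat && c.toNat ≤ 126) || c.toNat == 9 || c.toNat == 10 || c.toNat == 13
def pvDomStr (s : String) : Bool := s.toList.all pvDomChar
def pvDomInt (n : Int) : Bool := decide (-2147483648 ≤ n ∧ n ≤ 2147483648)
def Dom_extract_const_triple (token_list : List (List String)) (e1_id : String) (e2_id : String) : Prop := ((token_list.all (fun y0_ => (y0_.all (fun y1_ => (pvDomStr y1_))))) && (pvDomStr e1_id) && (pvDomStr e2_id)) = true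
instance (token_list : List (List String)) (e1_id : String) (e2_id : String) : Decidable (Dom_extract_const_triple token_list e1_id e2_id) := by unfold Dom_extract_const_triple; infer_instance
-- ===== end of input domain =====

-- B replaces A's per-token cumulative emptiness bookkeeping for `const` by recording the first
-- occurrence indices of the two ids and taking one slice of token_list (objective: alternative
-- decomposition, same O(n) cost). Return value only; neither program mutates its arguments.

-- shared accessor: token[8]; total form, Pre_ guarantees the index is in range
def pvTok8 (token : List String) : String := PySem.List.pyGetD token 8 ""

-- ===== PORT A =====
def extract_const_triple (token_list : List (List String)) (e1_id : String) (e2_id : String) : List (List (List String)) :=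
  let st := token_list.foldl
    (fun (s : List (List String) × List (List String) × List (List String)) token =>
      let e1 := s.1; let const := s.2.1; let e2 := s.2.2
      let e1 := if pvTok8 token = e1_id then e1 ++ [token] else e1
      let e2 := if pvTok8 token = e2_id then e2 ++ [token] else e2
      let const := if e1 ≠ [] ∧ e2 = [] then const ++ [token] else const
      let const := if e1 = [] ∧ e2 ≠ [] then const ++ [token] else const
      (e1, const, e2))
    ([], [], [])
  [st.1, st.2.2, st.2.1]

-- ===== PORT B =====
def extract_const_triple_alt (token_list : List (List String)) (e1_id : String) (e2_id : String) : List (List (List String)) :=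
  let st := (PySem.List.enumerate token_list 0).foldl
    (fun (s : List (List String) × List (List String) × Option Int × Option Int) kt =>
      let k := kt.1; let token := kt.2
      let e1 := s.1; let e2 := s.2.1; let i1 := s.2.2.1; let i2 := s.2.2.2
      let tid := pvTok8 token
      let p1 := if tid = e1_id then (e1 ++ [token], if i1 = none then some k else i1) else (e1, i1)
      let p2 := if tid = e2_id then (e2 ++ [token], if i2 = none then some k else i2) else (e2, i2)
      (p1.1, p2.1, p1.2, p2.2))
    ([], [], none, none)
  let const : List (List String) :=
    match st.2.2.1, st.2.2.2 with
    | none, none => []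
    | none, some j => PySem.List.slice token_list (some j) none
    | some i, none => PySem.List.slice token_list (some i) none
    | some i, some j => PySem.List.slice token_list (some (min i j)) (some (max i j))
  [st.1, st.2.1, const]

-- ===== PRECONDITION & SPEC =====
-- Pre_ excludes exactly the inputs where Python A raises IndexError: a token with fewer than 9 fields.
def Pre_extract_const_triple (token_list : List (List String)) (e1_id : String) (e2_id : String) : Prop :=
  ∀ token ∈ token_list, 9 ≤ token.length
instance (token_list : List (List String)) (e1_id : String) (e2_id : String) : Decidable (Pre_extract_const_triple token_list e1_id e2_id) := by unfold Pre_extract_const_triple; infer_instance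

def pvWitness_extract_const_triple : List (List String) × String × String :=
  ([["w1", "w2", "w3", "w4", "w5", "w6", "w7", "w8", "E1"],
    ["v1", "v2", "v3", "v4", "v5", "v6", "v7", "v8", "E2"]], "E1", "E2")

def Spec_extract_const_triple (token_list : List (List String)) (e1_id : String) (e2_id : String) (out : List (List (List String))) : Prop := out = extract_const_triple_alt token_list e1_id e2_id
instance (token_list : List (List String)) (e1_id : String) (e2_id : String) (out : List (List (List String))) : Decidable (Spec_extract_const_triple token_list e1_id e2_id out) := by unfold Spec_extract_const_triple; infer_instance

-- ===== CLAIM (what is proved, stated in full; the proofs are below) =====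
def Claim_equal_extract_const_triple : Prop := ∀ (token_list : List (List String)) (e1_id : String) (e2_id : String), Dom_extract_const_triple token_list e1_id e2_id → Pre_extract_const_triple token_list e1_id e2_id → Spec_extract_const_triple token_list e1_id e2_id (extract_const_triple token_list e1_id e2_id)

-- ===== LEMMAS AND PROOFS =====

-- reference form of A's `const` accumulation: b1/b2 say whether e1/e2 are already nonempty
def pvConstFrom {α : Type} (pb qb : α → Bool) (b1 b2 : Bool) : List α → List α
  | [] => []
  | t :: ts =>
    (if ((b1 || pb t) && !(b2 || qb t)) || (!(b1 || pb t) && (b2 || qb t)) then [t] else [])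
      ++ pvConstFrom pb qb (b1 || pb t) (b2 || qb t) ts

-- invariant of A's fold
theorem pvA_inv (e1_id e2_id : String) (l : List (List String)) :
    ∀ (e1 c e2 : List (List String)),
    l.foldl
      (fun (s : List (List String) × List (List String) × List (List String)) token =>
        let e1 := s.1; let const := s.2.1; let e2 := s.2.2
        let e1 := if pvTok8 token = e1_id then e1 ++ [token] else e1
        let e2 := if pvTok8 token = e2_id then e2 ++ [token] else e2
        let const := if e1 ≠ [] ∧ e2 = [] then const ++ [token] else const
        let const := if e1 = [] ∧ e2 ≠ [] then const ++ [token] else const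
        (e1, const, e2)) (e1, c, e2)
    = (e1 ++ l.filter (fun t => decide (pvTok8 t = e1_id)),
       c ++ pvConstFrom (fun t => decide (pvTok8 t = e1_id)) (fun t => decide (pvTok8 t = e2_id))
             (!e1.isEmpty) (!e2.isEmpty) l,
       e2 ++ l.filter (fun t => decide (pvTok8 t = e2_id))) := by
  induction l with
  | nil => intro e1 c e2; simp [pvConstFrom]
  | cons t ts ih =>
    intro e1 c e2
    simp only [List.foldl_cons]
    rw [ih]
    by_cases h1 : pvTok8 t = e1_id <;> by_cases h2 : pvTok8 t = e2_id <;>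
      cases e1 <;> cases e2 <;>
      simp_all [pvConstFrom, List.filter_cons]

-- first-occurrence index of pb in l, counting from n
def pvIdxFrom {α : Type} (pb : α → Bool) (n : Int) (l : List α) : Option Int :=
  (l.findIdx? pb).map (fun k => n + (k : Int))

theorem pvIdxFrom_cons {α : Type} (pb : α → Bool) (n : Int) (t : α) (ts : List α) :
    pvIdxFrom pb n (t :: ts) = if pb t then some n else pvIdxFrom pb (n + 1) ts := by
  cases hf : ts.findIdx? pb with
  | none => by_cases h : pb t = true <;> simp [pvIdxFrom, List.findIdx?_cons, h, hf]
  | some k =>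
    by_cases h : pb t = true
    · simp [pvIdxFrom, List.findIdx?_cons, h, hf]
    · simp [pvIdxFrom, List.findIdx?_cons, h, hf]
      omega

-- invariant of B's fold
theorem pvB_inv (e1_id e2_id : String) (l : List (List String)) :
    ∀ (n : Int) (e1 e2 : List (List String)) (i1 i2 : Option Int),
    (PySem.List.enumerate l n).foldl
      (fun (s : List (List String) × List (List String) × Option Int × Option Int) kt =>
        let k := kt.1; let token := kt.2
        let e1 := s.1; let e2 := s.2.1; let i1 := s.2.2.1; let i2 := s.2.2.2
        let tid := pvTok8 token
        let p1 := if tid = e1_id then (e1 ++ [token], if i1 = none then some k else i1) else (e1, i1)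
        let p2 := if tid = e2_id then (e2 ++ [token], if i2 = none then some k else i2) else (e2, i2)
        (p1.1, p2.1, p1.2, p2.2)) (e1, e2, i1, i2)
    = (e1 ++ l.filter (fun t => decide (pvTok8 t = e1_id)),
       e2 ++ l.filter (fun t => decide (pvTok8 t = e2_id)),
       i1.or (pvIdxFrom (fun t => decide (pvTok8 t = e1_id)) n l),
       i2.or (pvIdxFrom (fun t => decide (pvTok8 t = e2_id)) n l)) := by
  induction l with
  | nil => intro n e1 e2 i1 i2; simp [PySem.List.enumerate_nil, pvIdxFrom]
  | cons t ts ih =>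
    intro n e1 e2 i1 i2
    rw [PySem.List.enumerate_cons]
    simp only [List.foldl_cons]
    rw [ih]
    by_cases h1 : pvTok8 t = e1_id <;> by_cases h2 : pvTok8 t = e2_id <;>
      cases i1 <;> cases i2 <;>
      simp_all [pvIdxFrom_cons, List.filter_cons, Option.or]

-- pvConstFrom once both ids have been seen: nothing more is appended
theorem pvConstFrom_tt {α : Type} (pb qb : α → Bool) (l : List α) :
    pvConstFrom pb qb true true l = [] := by
  induction l with
  | nil => rfl
  | cons t ts ih => simp [pvConstFrom, ih]

-- pvConstFrom with only e1 seen: take until the first e2 match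
theorem pvConstFrom_tf {α : Type} (pb qb : α → Bool) (l : List α) :
    pvConstFrom pb qb true false l = l.takeWhile (fun t => !qb t) := by
  induction l with
  | nil => rfl
  | cons t ts ih =>
    by_cases h : qb t = true <;> simp [pvConstFrom, h, ih, List.takeWhile_cons, pvConstFrom_tt]

theorem pvConstFrom_ft {α : Type} (pb qb : α → Bool) (l : List α) :
    pvConstFrom pb qb false true l = l.takeWhile (fun t => !pb t) := by
  induction l with
  | nil => rfl
  | cons t ts ih =>
    by_cases h : pb t = true <;> simp [pvConstFrom, h, ih, List.takeWhile_cons, pvConstFrom_tt]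

theorem pvTakeWhile_of_findIdx?_none {α : Type} (qb : α → Bool) (l : List α)
    (h : l.findIdx? qb = none) : l.takeWhile (fun t => !qb t) = l := by
  induction l with
  | nil => rfl
  | cons t ts ih =>
    rw [List.findIdx?_cons] at h
    by_cases hq : qb t = true
    · simp [hq] at h
    · simp [hq, List.takeWhile_cons, ih (by simpa [hq] using h)]

theorem pvTakeWhile_of_findIdx?_some {α : Type} (qb : α → Bool) (l : List α) :
    ∀ (j : Nat), l.findIdx? qb = some j → l.takeWhile (fun t => !qb t) = l.take j := by
  induction l with
  | nil => intro j h; simp at h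
  | cons t ts ih =>
    intro j h
    rw [List.findIdx?_cons] at h
    by_cases hq : qb t = true
    · simp [hq] at h; simp [hq, List.takeWhile_cons, ← h]
    · simp only [hq, if_false, if_neg] at h
      simp only [Bool.false_eq_true, if_false, Option.map_eq_some_iff] at h
      obtain ⟨j', hj', rfl⟩ := h
      simp [hq, List.takeWhile_cons, ih j' hj']

-- the four cases for pvConstFrom false false in terms of the first-occurrence indices
theorem pvConstFrom_none_none {α : Type} (pb qb : α → Bool) (l : List α)
    (h1 : l.findIdx? pb = none) (h2 : l.findIdx? qb = none) :
    pvConstFrom pb qb false false l = [] := by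
  induction l with
  | nil => rfl
  | cons t ts ih =>
    rw [List.findIdx?_cons] at h1 h2
    by_cases k1 : pb t = true; · simp [k1] at h1
    by_cases k2 : qb t = true; · simp [k2] at h2
    simp [pvConstFrom, k1, k2, ih (by simpa [k1] using h1) (by simpa [k2] using h2)]

theorem pvConstFrom_some_none {α : Type} (pb qb : α → Bool) (l : List α) :
    ∀ (i : Nat), l.findIdx? pb = some i → l.findIdx? qb = none →
    pvConstFrom pb qb false false l = l.drop i := by
  induction l with
  | nil => intro i h; simp at h
  | cons t ts ih =>
    intro i h1 h2
    rw [List.findIdx?_cons] at h1 h2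
    by_cases k2 : qb t = true; · simp [k2] at h2
    replace h2 : ts.findIdx? qb = none := by simpa [k2] using h2
    by_cases k1 : pb t = true
    · simp [k1] at h1
      simp [pvConstFrom, k1, k2, ← h1, pvConstFrom_tf, pvTakeWhile_of_findIdx?_none qb ts h2]
    · simp only [k1, Bool.false_eq_true, if_false, Option.map_eq_some_iff] at h1
      obtain ⟨i', hi', rfl⟩ := h1
      simp [pvConstFrom, k1, k2, ih i' hi' h2]

theorem pvConstFrom_none_some {α : Type} (pb qb : α → Bool) (l : List α) :
    ∀ (j : Nat), l.findIdx? pb = none → l.findIdx? qb = some j →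
    pvConstFrom pb qb false false l = l.drop j := by
  induction l with
  | nil => intro j _ h; simp at h
  | cons t ts ih =>
    intro j h1 h2
    rw [List.findIdx?_cons] at h1 h2
    by_cases k1 : pb t = true; · simp [k1] at h1
    replace h1 : ts.findIdx? pb = none := by simpa [k1] using h1
    by_cases k2 : qb t = true
    · simp [k2] at h2
      simp [pvConstFrom, k1, k2, ← h2, pvConstFrom_ft, pvTakeWhile_of_findIdx?_none pb ts h1]
    · simp only [k2, Bool.false_eq_true, if_false, Option.map_eq_some_iff] at h2
      obtain ⟨j', hj', rfl⟩ := h2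
      simp [pvConstFrom, k1, k2, ih j' h1 hj']

theorem pvConstFrom_some_some {α : Type} (pb qb : α → Bool) (l : List α) :
    ∀ (i j : Nat), l.findIdx? pb = some i → l.findIdx? qb = some j →
    pvConstFrom pb qb false false l = (l.drop (min i j)).take (max i j - min i j) := by
  induction l with
  | nil => intro i j h; simp at h
  | cons t ts ih =>
    intro i j h1 h2
    rw [List.findIdx?_cons] at h1 h2
    by_cases k1 : pb t = true <;> by_cases k2 : qb t = true
    · simp [k1] at h1; simp [k2] at h2
      simp [pvConstFrom, k1, k2, ← h1, ← h2, pvConstFrom_tt]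
    · simp [k1] at h1
      simp only [k2, Bool.false_eq_true, if_false, Option.map_eq_some_iff] at h2
      obtain ⟨j', hj', rfl⟩ := h2
      simp [pvConstFrom, k1, k2, ← h1, pvConstFrom_tf,
        pvTakeWhile_of_findIdx?_some qb ts j' hj']
    · simp [k2] at h2
      simp only [k1, Bool.false_eq_true, if_false, Option.map_eq_some_iff] at h1
      obtain ⟨i', hi', rfl⟩ := h1
      simp [pvConstFrom, k1, k2, ← h2, pvConstFrom_ft,
        pvTakeWhile_of_findIdx?_some pb ts i' hi']
    · simp only [k1, k2, Bool.false_eq_true, if_false, Option.map_eq_some_iff] at h1 h2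
      obtain ⟨i', hi', rfl⟩ := h1
      obtain ⟨j', hj', rfl⟩ := h2
      have hmin : min (i' + 1) (j' + 1) = min i' j' + 1 := by omega
      have hmax : max (i' + 1) (j' + 1) - min (i' + 1) (j' + 1) = max i' j' - min i' j' := by omega
      simp [pvConstFrom, k1, k2, ih i' j' hi' hj', hmin, hmax]

-- ===== VERDICT (by name: the statement is the Claim_ definition above) =====
theorem extract_const_triple_spec : Claim_equal_extract_const_triple := by
  intro token_list e1_id e2_id _ _
  unfold Spec_extract_const_triple extract_const_triple extract_const_triple_alt
  rw [pvA_inv e1_id e2_id token_list [] [] [], pvB_inv e1_id e2_id token_list 0 [] [] none none]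
  simp only [List.nil_append, List.isEmpty_nil, Bool.not_true, Option.or, Option.none_or]
  congr 1
  congr 1
  rcases h1 : token_list.findIdx? (fun t => decide (pvTok8 t = e1_id)) with _ | i <;>
    rcases h2 : token_list.findIdx? (fun t => decide (pvTok8 t = e2_id)) with _ | j <;>
    simp [pvIdxFrom, h1, h2]
  · exact pvConstFrom_none_none _ _ _ h1 h2
  · rw [pvConstFrom_none_some _ _ _ j h1 h2]
  · rw [pvConstFrom_some_none _ _ _ i h1 h2]
  · rw [pvConstFrom_some_some _ _ _ i j h1 h2, ← Nat.cast_min, ← Nat.cast_max,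
      PySem.List.slice_natCast]
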